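-- pv_equiv track=rewrite | github.com/SVCE-ACM/A-December-of-Algorithms-2021 | December-08/python3_dsaghicha.py | counter_value
-- ===== SOURCE A (Python) =====
-- def counter_value(timer: int) -> int:
--     if timer == 0:
--         return 0
--
--     counter_dial: int = 0
--     prev_dial: int = 0
--     cycle_dial: int = 0
--     counter = 0
--     while timer > counter_dial:
--         counter += 1
--         prev_dial = counter_dial
--         counter_dial = counter_dial + 3 * (2 ** cycle_dial)
--         cycle_dial += 1
--
--     return 3 * (2 ** (cycle_dial - 1)) - (timer - prev_dial) + 1
-- ===== SOURCE B (Python) =====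
-- def counter_value(timer: int) -> int:
--     if timer == 0:
--         return 0
--     q = (timer + 5) // 3                      # ceil((timer + 3) / 3)
--     k = 0 if q <= 1 else (q - 1).bit_length() # smallest k with 3*(2**k - 1) >= timer
--     prev_dial = 3 * (2 ** (k - 1) - 1)
--     return 3 * 2 ** (k - 1) - (timer - prev_dial) + 1
-- ===== Notes on version B (the rewrite author's own statement) =====
-- stated objective: simpler
-- what changed: Replaces A's while-loop that grows the dial geometrically step by step with a closed-form computation of the target exponent via bit_length (q=(timer+5)//3, k=(q-1).bit_length()).
-- outside the precondition, e.g. on counter_value(-1): A returns 3.5, B returns 2.0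
import Mathlib
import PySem

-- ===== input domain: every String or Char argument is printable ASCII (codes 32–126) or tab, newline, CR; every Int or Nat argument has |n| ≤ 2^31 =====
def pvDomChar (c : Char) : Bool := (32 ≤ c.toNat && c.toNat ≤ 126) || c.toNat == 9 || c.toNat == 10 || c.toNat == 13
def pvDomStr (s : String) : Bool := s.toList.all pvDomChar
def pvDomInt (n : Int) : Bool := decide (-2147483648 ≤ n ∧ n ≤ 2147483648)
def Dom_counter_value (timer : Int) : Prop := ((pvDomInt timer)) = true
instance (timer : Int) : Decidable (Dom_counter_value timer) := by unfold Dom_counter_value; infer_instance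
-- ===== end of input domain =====

-- B replaces A's geometric-growth while-loop by a closed-form bit_length computation of the
-- target exponent; return values only, no mutation.

-- ===== PORT A =====
-- A's while-loop. cycle_dial stays ≥ 0 throughout, so '2 ** cycle_dial' is 2 ^ cycle_dial.toNat
-- exactly; '2 ** (cycle_dial - 1)' at exit is exact because for timer ≥ 1 (Pre_) the loop has run
-- at least once, so cycle_dial ≥ 1 there (for timer < 0 Python produces a float, excluded by Pre_).
def counterLoopA (timer counter_dial prev_dial cycle_dial counter : Int) : Int :=
  if timer > counter_dial then
    counterLoopA timer (counter_dial + 3 * 2 ^ cycle_dial.toNat) counter_dial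
      (cycle_dial + 1) (counter + 1)
  else 3 * 2 ^ (cycle_dial - 1).toNat - (timer - prev_dial) + 1
termination_by (timer - counter_dial).toNat
decreasing_by
  have h1 : (1 : Int) ≤ 2 ^ cycle_dial.toNat := one_le_pow₀ (by norm_num)
  omega

def counter_value (timer : Int) : Int :=
  if timer = 0 then 0 else counterLoopA timer 0 0 0 0

-- ===== PORT B =====
-- Source B's closed form. '(q - 1).bit_length()' is PySem.Int.bitLength (Python-exact);
-- '2 ** (k - 1)' is exact for the same reason as in A (k ≥ 1 whenever timer ≥ 1).
def counter_value_alt (timer : Int) : Int :=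
  if timer = 0 then 0
  else
    let q : Int := PySem.Int.floordiv (timer + 5) 3
    let k : Int := if q ≤ 1 then 0 else (PySem.Int.bitLength (q - 1) : Int)
    let prev_dial : Int := 3 * (2 ^ (k - 1).toNat - 1)
    3 * 2 ^ (k - 1).toNat - (timer - prev_dial) + 1

-- ===== PRECONDITION & SPEC =====
-- Pre_ excludes negative timer, on which Python's '2 ** (cycle_dial - 1)' (resp. '2 ** (k - 1)')
-- makes both A and B return a float rather than an int.
def Pre_counter_value (timer : Int) : Prop := 0 ≤ timer
instance (timer : Int) : Decidable (Pre_counter_value timer) := by unfold Pre_counter_value; infer_instance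
def pvWitness_counter_value : Int := (7)

def Spec_counter_value (timer : Int) (out : Int) : Prop := out = counter_value_alt timer
instance (timer : Int) (out : Int) : Decidable (Spec_counter_value timer out) := by unfold Spec_counter_value; infer_instance

-- ===== CLAIM (what is proved, stated in full; the proofs are below) =====
def Claim_equal_counter_value : Prop := ∀ (timer : Int), Dom_counter_value timer → Pre_counter_value timer → Spec_counter_value timer (counter_value timer)

-- ===== LEMMAS AND PROOFS =====

-- The loop, started at the invariant state for cycle 'cyc' with k - cyc rounds to go, returns the
-- closed form at the exit cycle k (the smallest k with timer ≤ 3*(2^k - 1), given by h1/h2).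
lemma counterLoopA_closed (timer : Int) (k : Nat) (hk : 1 ≤ k)
    (h1 : timer ≤ 3 * ((2 : Int) ^ k - 1))
    (h2 : 3 * ((2 : Int) ^ (k - 1) - 1) < timer) :
    ∀ (j cyc : Nat) (c pd : Int), cyc + j = k →
      pd = (if cyc = 0 then 0 else 3 * ((2 : Int) ^ (cyc - 1) - 1)) →
      counterLoopA timer (3 * ((2 : Int) ^ cyc - 1)) pd (cyc : Int) c
        = 3 * (2 : Int) ^ (k - 1) - (timer - 3 * ((2 : Int) ^ (k - 1) - 1)) + 1 := by
  intro j
  induction j with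
  | zero =>
    intro cyc c pd hcyc hpd
    have hck : cyc = k := by omega
    subst hck
    rw [counterLoopA]
    have hnot : ¬ timer > 3 * ((2 : Int) ^ cyc - 1) := by omega
    rw [if_neg hnot]
    have hpd' : pd = 3 * ((2 : Int) ^ (cyc - 1) - 1) := by
      rw [hpd, if_neg (by omega)]
    have hexp : ((cyc : Int) - 1).toNat = cyc - 1 := by omega
    rw [hpd', hexp]
  | succ n ih =>
    intro cyc c pd hcyc hpd
    have hlt : cyc < k := by omega
    have hle : (2 : Int) ^ cyc ≤ 2 ^ (k - 1) := by
      apply pow_le_pow_right₀ (by norm_num) (by omega)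
    rw [counterLoopA]
    rw [if_pos (by omega)]
    have hcast : ((cyc : Int)).toNat = cyc := Int.toNat_natCast cyc
    have harg : 3 * ((2 : Int) ^ cyc - 1) + 3 * 2 ^ ((cyc : Int)).toNat
        = 3 * ((2 : Int) ^ (cyc + 1) - 1) := by
      rw [hcast]; ring
    have hcyc1 : (cyc : Int) + 1 = ((cyc + 1 : Nat) : Int) := by push_cast; ring
    rw [harg, hcyc1]
    exact ih (cyc + 1) (c + 1) _ (by omega) (by rw [if_neg (by omega)]; simp)

-- Bracket for B's exponent: with q = (timer+5)//3 and k = bitLength (q-1),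
-- k is exactly A's exit cycle: timer ≤ 3*(2^k - 1) and 3*(2^(k-1) - 1) < timer.
lemma bitLength_brackets (timer : Int) (h : 1 ≤ timer) :
    1 ≤ PySem.Int.bitLength (PySem.Int.floordiv (timer + 5) 3 - 1) ∧
    timer ≤ 3 * ((2 : Int) ^ PySem.Int.bitLength (PySem.Int.floordiv (timer + 5) 3 - 1) - 1) ∧
    3 * ((2 : Int) ^ (PySem.Int.bitLength (PySem.Int.floordiv (timer + 5) 3 - 1) - 1) - 1) < timer := by
  set q : Int := PySem.Int.floordiv (timer + 5) 3 with hq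
  have hdiv : q = (timer + 5) / 3 := PySem.Int.floordiv_eq_ediv_of_pos (by norm_num)
  have hb1 : 3 * q ≤ timer + 5 := by omega
  have hb2 : timer + 5 < 3 * q + 3 := by omega
  have hq2 : 2 ≤ q := by omega
  set m : Int := q - 1 with hm
  have hm1 : 1 ≤ m := by omega
  have hmne : m ≠ 0 := by omega
  set k : Nat := PySem.Int.bitLength m with hk
  have hub : m.natAbs < 2 ^ k := PySem.Int.lt_two_pow_bitLength m
  have hlb : 2 ^ (k - 1) ≤ m.natAbs := PySem.Int.two_pow_bitLength_le m hmne
  have hk1 : 1 ≤ k := by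
    by_contra hc
    have : k = 0 := by omega
    rw [this] at hub
    omega
  have habs : (m.natAbs : Int) = m := Int.natAbs_of_nonneg (by omega)
  have hubZ : m < (2 : Int) ^ k := by
    calc m = (m.natAbs : Int) := habs.symm
      _ < ((2 ^ k : Nat) : Int) := by exact_mod_cast hub
      _ = (2 : Int) ^ k := by push_cast; ring
  have hlbZ : (2 : Int) ^ (k - 1) ≤ m := by
    calc (2 : Int) ^ (k - 1) = ((2 ^ (k - 1) : Nat) : Int) := by push_cast; ring
      _ ≤ (m.natAbs : Int) := by exact_mod_cast hlb
      _ = m := habs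
  refine ⟨hk1, ?_, ?_⟩
  · -- timer ≤ 3q - 3 ≤ 3*2^k - 3
    have : q ≤ (2 : Int) ^ k := by omega
    omega
  · -- 3*2^(k-1) ≤ 3(q-1) = 3q - 3 ≤ timer + 2
    omega

-- ===== VERDICT (by name: the statement is the Claim_ definition above) =====
theorem counter_value_spec : Claim_equal_counter_value := by
  intro timer _ hpre
  unfold Spec_counter_value counter_value counter_value_alt
  by_cases h0 : timer = 0
  · simp [h0]
  · rw [if_neg h0, if_neg h0]
    have h1 : 1 ≤ timer := by
      unfold Pre_counter_value at hpre; omega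
    obtain ⟨hk1, hA, hB⟩ := bitLength_brackets timer h1
    set q : Int := PySem.Int.floordiv (timer + 5) 3 with hq
    have hdiv : q = (timer + 5) / 3 := PySem.Int.floordiv_eq_ediv_of_pos (by norm_num)
    have hq2 : 2 ≤ q := by omega
    set k : Nat := PySem.Int.bitLength (q - 1) with hk
    have hnotle : ¬ q ≤ 1 := by omega
    simp only [hnotle, if_false]
    have hexp : (((k : Int)) - 1).toNat = k - 1 := by omega
    have hloop := counterLoopA_closed timer k hk1 hA hB k 0 0 0 (by omega) (by simp)
    simp only [Nat.cast_zero, pow_zero] at hloop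
    norm_num at hloop
    rw [hloop, hexp]
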